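-- pv_equiv track=rewrite | github.com/PROxZIMA/Advent-of-Code | 2020/Day 10/day-10.py | both_part
-- ===== SOURCE A (Python) =====
-- def both_part(data):
--     diff1, diff3, pac_of_1, arrange = 0, 0, 0, 1
--
--     for i in range(1, len(data)):
--         if data[i] - data[i - 1] == 1:
--             diff1 += 1
--             pac_of_1 += 1
--         else:
--             diff3 += 1
--             arrange *= (7 if pac_of_1 == 4 else 4 if pac_of_1 == 3 else 2 if pac_of_1 == 2 else 1)
--             pac_of_1 = 0
--
--     return (diff1 * diff3, arrange)
-- ===== SOURCE B (Python) =====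
-- def both_part(data):
--     diffs = [b - a for a, b in zip(data, data[1:])]
--     diff1 = diffs.count(1)
--     part1 = diff1 * (len(diffs) - diff1)
--     arrange = 1
--     m = len(diffs)
--     i = 0
--     while i < m:
--         j = i + 1
--         while j < m and diffs[j] == diffs[i]:
--             j += 1
--         if diffs[i] == 1 and j < m:
--             arrange *= {2: 2, 3: 4, 4: 7}.get(j - i, 1)
--         i = j
--     return (part1, arrange)
-- ===== Notes on version B (the rewrite author's own statement) =====
-- stated objective: alternative
-- what changed: B materialises the difference list once, gets part 1 from a count of 1-gaps, and computes the arrangement product by walking maximal runs of 1s (multiplying only for runs terminated by a later gap), instead of A's single index loop that threads a running pac_of_1 counter through every step.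
import Mathlib
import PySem

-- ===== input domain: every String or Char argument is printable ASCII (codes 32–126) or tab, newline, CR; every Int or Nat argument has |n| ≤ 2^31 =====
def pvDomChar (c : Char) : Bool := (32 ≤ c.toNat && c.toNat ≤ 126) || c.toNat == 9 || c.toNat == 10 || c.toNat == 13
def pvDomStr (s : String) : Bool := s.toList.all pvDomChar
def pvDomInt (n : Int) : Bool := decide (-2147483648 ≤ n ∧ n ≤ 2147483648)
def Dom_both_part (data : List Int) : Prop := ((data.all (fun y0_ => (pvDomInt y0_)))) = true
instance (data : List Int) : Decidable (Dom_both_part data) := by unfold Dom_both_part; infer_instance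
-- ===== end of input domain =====

-- B re-implements A by materialising the difference list once (its counts give part 1) and walking
-- its maximal runs for part 2, instead of A's single index loop with a running run counter;
-- objective: alternative decomposition, same cost.

-- ===== PORT A =====
-- literal transliteration of A: one fold over range(1, len(data)) carrying (diff1, diff3, pac_of_1, arrange)
def both_part (data : List Int) : Int × Int :=
  let st := (PySem.List.pyRange 1 (data.length : Int)).foldl
    (fun (s : Int × Int × Int × Int) i =>
      match s with
      | (d1, d3, p, arr) =>
        if PySem.List.pyGetD data i 0 - PySem.List.pyGetD data (i - 1) 0 = 1 then
          (d1 + 1, d3, p + 1, arr)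
        else
          (d1, d3 + 1, 0, arr * (if p = 4 then 7 else if p = 3 then 4 else if p = 2 then 2 else 1)))
    (0, 0, 0, 1)
  (st.1 * st.2.1, st.2.2.2)

-- ===== PORT B =====
-- {2: 2, 3: 4, 4: 7}.get(n, 1)
def pvFactor (n : Int) : Int :=
  ((PySem.Dict.ofList [((2 : Int), (2 : Int)), (3, 4), (4, 7)]).get? n).getD 1

-- termination measure fact for the two while loops of Source B (cited by the ports below)
theorem pvRunEnd_lt (len j : Nat) (h : j < len) : len - (j + 1) < len - j := by omega

-- Source B's inner while: advance j past the run of diffs[i] starting at i+1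
def pvRunEnd (diffs : List Int) (i j : Nat) : Nat :=
  if h1 : j < diffs.length ∧ PySem.List.pyGetD diffs (j : Int) 0 = PySem.List.pyGetD diffs (i : Int) 0
  then pvRunEnd diffs i (j + 1)
  else j
termination_by diffs.length - j
decreasing_by exact pvRunEnd_lt diffs.length j h1.1

theorem pvRunEnd_ge (diffs : List Int) (i : Nat) :
    ∀ j, j ≤ pvRunEnd diffs i j := by
  intro j
  induction hn : diffs.length - j using Nat.strong_induction_on generalizing j with
  | _ n ih =>
    rw [pvRunEnd]
    split
    · rename_i hj
      have := ih (diffs.length - (j + 1)) (hn ▸ pvRunEnd_lt diffs.length j hj.1) (j + 1) rfl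
      omega
    · exact le_refl j

-- Source B's outer while over the run starts i
def pvRunsLoop (diffs : List Int) (i : Nat) (arrange : Int) : Int :=
  if _h : i < diffs.length then
    let j := pvRunEnd diffs i (i + 1)
    pvRunsLoop diffs j
      (if PySem.List.pyGetD diffs (i : Int) 0 = 1 ∧ j < diffs.length
       then arrange * pvFactor ((j : Int) - (i : Int)) else arrange)
  else arrange
termination_by diffs.length - i
decreasing_by
  have := pvRunEnd_ge diffs i (i + 1)
  omega

def both_part_alt (data : List Int) : Int × Int :=
  let diffs := (data.zip (PySem.List.slice data (some 1) none)).map (fun p => p.2 - p.1)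
  let diff1 : Int := (PySem.List.count diffs 1 : Int)
  let part1 := diff1 * ((diffs.length : Int) - diff1)
  (part1, pvRunsLoop diffs 0 1)

-- ===== PRECONDITION & SPEC =====
def Spec_both_part (data : List Int) (out : Int × Int) : Prop := out = both_part_alt data
instance (data : List Int) (out : Int × Int) : Decidable (Spec_both_part data out) := by unfold Spec_both_part; infer_instance

-- ===== CLAIM (what is proved, stated in full; the proofs are below) =====
def Claim_equal_both_part : Prop := ∀ (data : List Int), Dom_both_part data → Spec_both_part data (both_part data)

-- ===== LEMMAS AND PROOFS =====

-- proof-side: run-by-run walk of the difference list (the list view of B's index loop)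
def pvRunsL (rest : List Int) (arrange : Int) : Int :=
  match rest with
  | [] => arrange
  | key :: xs =>
    let n : Int := ((xs.takeWhile (fun d => d == key)).length : Int) + 1
    pvRunsL (xs.dropWhile (fun d => d == key))
      (if key = 1 ∧ n < (((key :: xs).length : Nat) : Int) then arrange * pvFactor n else arrange)
termination_by rest.length
decreasing_by
  simp only [List.length_cons]
  exact Nat.lt_succ_of_le (List.length_dropWhile_le _ _)


-- A's loop body, seen as a function of the state and of the current difference
def pvStepD (s : Int × Int × Int × Int) (d : Int) : Int × Int × Int × Int :=
  match s with
  | (d1, d3, p, arr) =>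
    if d = 1 then (d1 + 1, d3, p + 1, arr)
    else (d1, d3 + 1, 0, arr * (if p = 4 then 7 else if p = 3 then 4 else if p = 2 then 2 else 1))

-- the arrange component of A's loop, run from pac_of_1 = p and arrange = a
def pvAfold (ds : List Int) (p a : Int) : Int :=
  match ds with
  | [] => a
  | d :: ds =>
    if d = 1 then pvAfold ds (p + 1) a
    else pvAfold ds 0 (a * (if p = 4 then 7 else if p = 3 then 4 else if p = 2 then 2 else 1))

-- A's pac_of_1 after the loop
def pvPend (ds : List Int) (p : Int) : Int :=
  ds.foldl (fun q d => if d = 1 then q + 1 else 0) p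

def pvDiffs (data : List Int) : List Int :=
  (data.zip data.tail).map (fun p => p.2 - p.1)

theorem pvFactor_eq (p : Int) :
    pvFactor p = (if p = 4 then 7 else if p = 3 then 4 else if p = 2 then 2 else 1) := by
  have hitems : (PySem.Dict.ofList [((2 : Int), (2 : Int)), (3, 4), (4, 7)]).items
      = [((2 : Int), (2 : Int)), (3, 4), (4, 7)] := by decide
  by_cases h4 : p = 4 <;> by_cases h3 : p = 3 <;> by_cases h2 : p = 2 <;>
    first
      | (subst_vars; decide)
      | (unfold pvFactor PySem.Dict.get?
         rw [hitems]
         simp [beq_iff_eq, Ne.symm h2, Ne.symm h3, Ne.symm h4, h2, h3, h4])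

theorem pvRunsL_nil (a : Int) : pvRunsL [] a = a := by
  rw [pvRunsL]

theorem pvRunsL_cons (key : Int) (xs : List Int) (a : Int) :
    pvRunsL (key :: xs) a
    = pvRunsL (xs.dropWhile (fun d => d == key))
        (if key = 1 ∧ ((xs.takeWhile (fun d => d == key)).length : Int) + 1
            < (((key :: xs).length : Nat) : Int)
         then a * pvFactor (((xs.takeWhile (fun d => d == key)).length : Int) + 1) else a) := by
  rw [pvRunsL]

-- index-pair fold over range(1, len(data)) = fold over the difference list
theorem pvRange_to_diffs {α : Type} (g : α → Int → α) :
    ∀ (data : List Int) (init : α),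
      (List.range (data.length - 1)).foldl
        (fun s k => g s (data.getD (k + 1) 0 - data.getD k 0)) init
      = (pvDiffs data).foldl g init := by
  intro data
  induction data with
  | nil => intro init; simp [pvDiffs]
  | cons a rest ih =>
    intro init
    cases rest with
    | nil => simp [pvDiffs]
    | cons b rs =>
      have h1 : (a :: b :: rs : List Int).length - 1 = rs.length + 1 := by simp
      rw [h1, List.range_succ_eq_map, List.foldl_cons, List.foldl_map]
      have h2 := ih (g init (b - a))
      simp only [List.length_cons, Nat.add_sub_cancel] at h2
      show (List.range rs.length).foldl
          (fun s k => g s ((b :: rs).getD (k + 1) 0 - (b :: rs).getD k 0)) (g init (b - a))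
        = (pvDiffs (a :: b :: rs)).foldl g init
      rw [h2]
      simp [pvDiffs]

theorem pvStepD_spec :
    ∀ (ds : List Int) (d1 d3 p a : Int),
      ds.foldl pvStepD (d1, d3, p, a)
      = (d1 + (PySem.List.count ds 1 : Int),
         d3 + ((ds.length : Int) - (PySem.List.count ds 1 : Int)),
         pvPend ds p, pvAfold ds p a) := by
  intro ds
  induction ds with
  | nil => intro d1 d3 p a; simp [pvPend, pvAfold]
  | cons d ds ih =>
    intro d1 d3 p a
    have hlc : (PySem.List.count ds 1 : Int) ≤ (ds.length : Int) := by
      rw [PySem.List.count_eq]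
      exact_mod_cast List.count_le_length
    by_cases hd : d = 1
    · subst hd
      simp only [List.foldl_cons, pvStepD]
      rw [ih]
      have hc : PySem.List.count ((1 : Int) :: ds) 1 = PySem.List.count ds 1 + 1 := by
        simp [PySem.List.count_eq]
      simp only [hc, pvPend, pvAfold, List.foldl_cons, List.length_cons, Prod.mk.injEq]
      and_intros <;> push_cast <;> ring
    · simp only [List.foldl_cons, pvStepD, if_neg hd]
      rw [ih]
      have hc : PySem.List.count (d :: ds) 1 = PySem.List.count ds 1 := by
        simp [PySem.List.count_eq, hd]
      simp only [hc, pvPend, pvAfold, List.foldl_cons, if_neg hd, List.length_cons,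
        Prod.mk.injEq]
      and_intros
      all_goals first | rfl | (push_cast; try ring)

-- consuming a block of 1s increments pac_of_1 by its length
theorem pvAfold_ones (l : List Int) (h : ∀ x ∈ l, x = 1) :
    ∀ (rest : List Int) (p a : Int),
      pvAfold (l ++ rest) p a = pvAfold rest (p + (l.length : Int)) a := by
  induction l with
  | nil => intro rest p a; simp
  | cons x l ih =>
    intro rest p a
    have hx : x = 1 := h x (by simp)
    subst hx
    have := ih (fun y hy => h y (by simp [hy])) rest (p + 1) a
    simp only [List.cons_append, pvAfold]
    rw [this]
    simp only [List.length_cons]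
    push_cast
    ring_nf

-- consuming a block of non-1s from pac_of_1 = 0 multiplies arrange by 1 each time
theorem pvAfold_nones (l : List Int) (h : ∀ x ∈ l, x ≠ 1) :
    ∀ (rest : List Int) (a : Int),
      pvAfold (l ++ rest) 0 a = pvAfold rest 0 a := by
  induction l with
  | nil => intro rest a; simp
  | cons x l ih =>
    intro rest a
    have hx : x ≠ 1 := h x (by simp)
    simp only [List.cons_append, pvAfold, if_neg hx]
    norm_num
    exact ih (fun y hy => h y (by simp [hy])) rest a

theorem pvAfold_eq_runs : ∀ (n : Nat) (ds : List Int) (a : Int), ds.length ≤ n →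
    pvAfold ds 0 a = pvRunsL ds a := by
  intro n
  induction n with
  | zero =>
    intro ds a h
    have : ds = [] := List.eq_nil_of_length_eq_zero (Nat.le_zero.mp h)
    subst this
    simp [pvAfold, pvRunsL_nil]
  | succ n ih =>
    intro ds a h
    cases ds with
    | nil => simp [pvAfold, pvRunsL_nil]
    | cons key xs =>
      have hsplit : xs.takeWhile (fun d => d == key) ++ xs.dropWhile (fun d => d == key) = xs :=
        List.takeWhile_append_dropWhile
      have hlen : (xs.dropWhile (fun d => d == key)).length ≤ n := by
        have := List.length_dropWhile_le (fun d => d == key) xs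
        simp only [List.length_cons] at h
        omega
      have hlensum : (xs.takeWhile (fun d => d == key)).length
          + (xs.dropWhile (fun d => d == key)).length = xs.length := by
        rw [← List.length_append, hsplit]
      have htw : ∀ x ∈ xs.takeWhile (fun d => d == key), x = key := by
        intro x hx
        have hbx : (x == key) = true := List.mem_takeWhile_imp (p := fun d => d == key) hx
        exact eq_of_beq hbx
      rw [pvRunsL_cons]
      by_cases hkey : key = 1
      · subst hkey
        have hds : (1 : Int) :: xs
            = ((1 : Int) :: xs.takeWhile (fun d => d == 1)) ++ xs.dropWhile (fun d => d == 1) := by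
          simp [hsplit]
        have hAside : pvAfold ((1 : Int) :: xs) 0 a
            = pvAfold (xs.dropWhile (fun d => d == 1))
                (0 + ((((1 : Int) :: xs.takeWhile (fun d => d == 1)).length : Nat) : Int)) a := by
          conv_lhs => rw [hds]
          exact pvAfold_ones _ (by
            intro x hx
            rcases List.mem_cons.mp hx with hx | hx
            · exact hx
            · exact htw x hx) _ _ _
        rw [hAside]
        cases hrest : xs.dropWhile (fun d => d == (1 : Int)) with
        | nil =>
          -- unterminated trailing run: neither side multiplies
          have hcond : ¬ ((1 : Int) = 1 ∧ ((xs.takeWhile (fun d => d == (1 : Int))).length : Int) + 1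
              < ((((1 : Int) :: xs).length : Nat) : Int)) := by
            rw [hrest] at hlensum
            simp only [List.length_nil, Nat.add_zero] at hlensum
            simp only [List.length_cons, hlensum, not_and]
            intro _
            push_cast
            omega
          rw [if_neg hcond, pvRunsL_nil]
          simp [pvAfold]
        | cons r rs =>
          have hne : xs.dropWhile (fun d => d == (1 : Int)) ≠ [] := by rw [hrest]; simp
          have hr : r ≠ 1 := by
            have h0 := List.head_dropWhile_not (fun d => d == (1 : Int)) hne
            have hhead : (xs.dropWhile (fun d => d == (1 : Int))).head hne = r := by
              simp [hrest]
            rw [hhead] at h0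
            simpa using h0
          have hcond : ((1 : Int) = 1 ∧ ((xs.takeWhile (fun d => d == (1 : Int))).length : Int) + 1
              < ((((1 : Int) :: xs).length : Nat) : Int)) := by
            refine ⟨rfl, ?_⟩
            rw [hrest] at hlensum
            simp only [List.length_cons] at *
            push_cast
            omega
          rw [if_pos hcond]
          -- A side: the terminating r multiplies by factor(run length), then continues from 0
          set tw := (xs.takeWhile (fun d => d == (1 : Int))).length with htwdef
          have hstate : (0 : Int) + ((((1 : Int) :: xs.takeWhile (fun d => d == (1 : Int))).length : Nat) : Int)
              = (tw : Int) + 1 := by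
            simp [List.length_cons]
            exact htwdef.symm
          rw [hstate]
          have hB := ih (r :: rs) (a * pvFactor ((tw : Int) + 1)) (by rw [← hrest]; exact hlen)
          rw [← hB]
          -- both sides now step through r (≠ 1): A multiplies by factor(run length) here,
          -- B already carries it and multiplies by factor(0) = 1
          simp only [pvAfold, if_neg hr, pvFactor_eq]
          norm_num
      · have hds : key :: xs
            = (key :: xs.takeWhile (fun d => d == key)) ++ xs.dropWhile (fun d => d == key) := by
          simp [hsplit]
        have hAside : pvAfold (key :: xs) 0 a
            = pvAfold (xs.dropWhile (fun d => d == key)) 0 a := by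
          conv_lhs => rw [hds]
          exact pvAfold_nones _ (by
            intro x hx
            rcases List.mem_cons.mp hx with hx | hx
            · rw [hx]; exact hkey
            · rw [htw x hx]; exact hkey) _ _
        rw [hAside, if_neg (by intro hc; exact hkey hc.1)]
        exact ih _ a hlen

-- bridge from A's pyGetD-indexed body to the getD-on-Nat body
theorem pvIdx_bridge (data : List Int) (k : Nat) :
    PySem.List.pyGetD data (1 + (k : Int)) 0 - PySem.List.pyGetD data (1 + (k : Int) - 1) 0
    = data.getD (k + 1) 0 - data.getD k 0 := by
  have h2 : (1 + (k : Int) - 1) = ((k : Nat) : Int) := by omega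
  have h1 : (1 + (k : Int)) = ((k + 1 : Nat) : Int) := by omega
  rw [h2, h1, PySem.List.pyGetD_natCast, PySem.List.pyGetD_natCast]


theorem pvDropWhile_eq_drop (p : Int → Bool) (l : List Int) :
    l.dropWhile p = l.drop (l.takeWhile p).length := by
  induction l with
  | nil => rfl
  | cons x xs ih =>
    by_cases hx : p x
    · simp [hx, ih]
    · simp [hx]

-- the inner while ends exactly past the maximal run of diffs[i]
theorem pvRunEnd_spec (diffs : List Int) (i : Nat) :
    ∀ j, pvRunEnd diffs i j
      = j + ((diffs.drop j).takeWhile (fun d => d == PySem.List.pyGetD diffs (i : Int) 0)).length := by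
  intro j
  induction hn : diffs.length - j using Nat.strong_induction_on generalizing j with
  | _ n ih =>
    rw [pvRunEnd]
    split
    · rename_i hj
      obtain ⟨hjl, hjk⟩ := hj
      rw [ih (diffs.length - (j + 1)) (hn ▸ pvRunEnd_lt diffs.length j hjl) (j + 1) rfl]
      have hdrop : diffs.drop j = diffs[j] :: diffs.drop (j + 1) :=
        (List.getElem_cons_drop hjl).symm
      have hgj : PySem.List.pyGetD diffs (j : Int) 0 = diffs[j] := by
        rw [PySem.List.pyGetD_natCast]
        exact List.getD_eq_getElem _ _ hjl
      rw [hdrop, List.takeWhile_cons]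
      have : (diffs[j] == PySem.List.pyGetD diffs (i : Int) 0) = true := by
        rw [← hgj]; exact beq_iff_eq.mpr hjk
      simp only [this, if_true, List.length_cons]
      omega
    · rename_i hj
      rw [not_and_or] at hj
      rcases hj with hj | hj
      · have : diffs.drop j = [] := List.drop_eq_nil_of_le (by omega)
        simp [this]
      · by_cases hjl : j < diffs.length
        · have hdrop : diffs.drop j = diffs[j] :: diffs.drop (j + 1) :=
            (List.getElem_cons_drop hjl).symm
          have hgj : PySem.List.pyGetD diffs (j : Int) 0 = diffs[j] := by
            rw [PySem.List.pyGetD_natCast]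
            exact List.getD_eq_getElem _ _ hjl
          have : (diffs[j] == PySem.List.pyGetD diffs (i : Int) 0) = false := by
            rw [← hgj]
            exact beq_eq_false_iff_ne.mpr hj
          rw [hdrop, List.takeWhile_cons]
          simp only [this]
          simp
        · have : diffs.drop j = [] := List.drop_eq_nil_of_le (by omega)
          simp [this]

-- B's index loop is the run-by-run walk of the suffix it has not consumed yet
theorem pvRunsLoop_eq_runsL (diffs : List Int) :
    ∀ (n i : Nat) (a : Int), diffs.length - i ≤ n →
      pvRunsLoop diffs i a = pvRunsL (diffs.drop i) a := by
  intro n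
  induction n with
  | zero =>
    intro i a h
    have hle : diffs.length ≤ i := by omega
    rw [pvRunsLoop, dif_neg (by omega), List.drop_eq_nil_of_le hle, pvRunsL_nil]
  | succ n ih =>
    intro i a h
    by_cases hi : i < diffs.length
    · rw [pvRunsLoop, dif_pos hi]
      have hgi : PySem.List.pyGetD diffs (i : Int) 0 = diffs[i] := by
        rw [PySem.List.pyGetD_natCast]
        exact List.getD_eq_getElem _ _ hi
      have hdrop : diffs.drop i = diffs[i] :: diffs.drop (i + 1) :=
        (List.getElem_cons_drop hi).symm
      set xs := diffs.drop (i + 1) with hxs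
      set key := diffs[i] with hkey
      set tw := (xs.takeWhile (fun d => d == key)).length with htw
      have hje : pvRunEnd diffs i (i + 1) = i + 1 + tw := by
        rw [pvRunEnd_spec diffs i (i + 1), hgi]
      have hxslen : xs.length = diffs.length - (i + 1) := by
        rw [hxs]; exact List.length_drop
      have htwle : tw ≤ xs.length := by
        rw [htw]; exact (List.takeWhile_sublist _).length_le
      rw [hdrop, pvRunsL_cons]
      have hdropdrop : diffs.drop (pvRunEnd diffs i (i + 1)) = xs.dropWhile (fun d => d == key) := by
        rw [hje, pvDropWhile_eq_drop, hxs, List.drop_drop, ← htw]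
      have hcondeq : (PySem.List.pyGetD diffs (i : Int) 0 = 1 ∧ pvRunEnd diffs i (i + 1) < diffs.length)
          ↔ (key = 1 ∧ ((xs.takeWhile (fun d => d == key)).length : Int) + 1
              < (((key :: xs).length : Nat) : Int)) := by
        rw [hgi, hje, ← htw]
        constructor
        · rintro ⟨h1, h2⟩
          refine ⟨h1, ?_⟩
          simp only [List.length_cons]
          push_cast
          omega
        · rintro ⟨h1, h2⟩
          refine ⟨h1, ?_⟩
          simp only [List.length_cons] at h2
          push_cast at h2
          omega
      have hfacteq : ((pvRunEnd diffs i (i + 1) : Int) - (i : Int))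
          = ((xs.takeWhile (fun d => d == key)).length : Int) + 1 := by
        rw [hje, ← htw]
        push_cast
        ring
      have hihlen : diffs.length - pvRunEnd diffs i (i + 1) ≤ n := by
        rw [hje]; omega
      rw [ih (pvRunEnd diffs i (i + 1)) _ hihlen, hdropdrop]
      by_cases hc : PySem.List.pyGetD diffs (i : Int) 0 = 1 ∧ pvRunEnd diffs i (i + 1) < diffs.length
      · rw [if_pos hc, if_pos (hcondeq.mp hc), hfacteq]
      · rw [if_neg hc, if_neg (fun hrc => hc (hcondeq.mpr hrc))]
    · rw [pvRunsLoop, dif_neg hi, List.drop_eq_nil_of_le (by omega), pvRunsL_nil]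

-- ===== VERDICT (by name: the statement is the Claim_ definition above) =====
theorem both_part_spec : Claim_equal_both_part := by
  intro data _
  unfold Spec_both_part
  have hfold : (PySem.List.pyRange 1 (data.length : Int)).foldl
      (fun (s : Int × Int × Int × Int) i =>
        pvStepD s (PySem.List.pyGetD data i 0 - PySem.List.pyGetD data (i - 1) 0))
      (0, 0, 0, 1)
      = (pvDiffs data).foldl pvStepD ((0 : Int), (0 : Int), (0 : Int), (1 : Int)) := by
    rw [PySem.List.pyRange_one, List.foldl_map]
    have hbody : (fun (s : Int × Int × Int × Int) (k : Nat) =>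
        pvStepD s (PySem.List.pyGetD data (1 + (k : Int)) 0 - PySem.List.pyGetD data (1 + (k : Int) - 1) 0))
        = fun s k => pvStepD s (data.getD (k + 1) 0 - data.getD k 0) := by
      funext s k
      rw [pvIdx_bridge]
    have hcnt : ((data.length : Int) - 1).toNat = data.length - 1 := by omega
    rw [hbody, hcnt]
    exact pvRange_to_diffs pvStepD data _
  have hA : both_part data
      = (((pvDiffs data).foldl pvStepD ((0 : Int), (0 : Int), (0 : Int), (1 : Int))).1
          * ((pvDiffs data).foldl pvStepD ((0 : Int), (0 : Int), (0 : Int), (1 : Int))).2.1,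
         ((pvDiffs data).foldl pvStepD ((0 : Int), (0 : Int), (0 : Int), (1 : Int))).2.2.2) := by
    unfold both_part
    rw [← hfold]
    rfl
  have hB : both_part_alt data
      = ((PySem.List.count (pvDiffs data) 1 : Int)
            * (((pvDiffs data).length : Int) - (PySem.List.count (pvDiffs data) 1 : Int)),
         pvRunsLoop (pvDiffs data) 0 1) := by
    unfold both_part_alt
    rw [PySem.List.slice_from_one]
    rfl
  rw [hA, hB, pvStepD_spec]
  rw [pvAfold_eq_runs (pvDiffs data).length (pvDiffs data) 1 le_rfl]
  rw [pvRunsLoop_eq_runsL (pvDiffs data) (pvDiffs data).length 0 1 (by omega), List.drop_zero]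
  simp
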